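-- pv_equiv track=rewrite | github.com/northeastern-datalab/alite | codes/pdelay_fd.py | JCC
-- ===== SOURCE A (Python) =====
-- def JCC(new_t, existing_t):
--     #check what are the matching positions:
--     existing_t_schema = set()
--     for t in existing_t:
--         current_t_schema = set(t.keys())
--         existing_t_schema = existing_t_schema.union(current_t_schema)
--     new_t_schema = set(new_t.keys())
--     intersecting_attributes = new_t_schema.intersection(existing_t_schema)
--     if len(intersecting_attributes) > 0:
--         for t in existing_t:
--             current_t_schema = set(t.keys())
--             for a in intersecting_attributes:
--                 if a in current_t_schema and (t[a] != new_t[a] or (t[a] == new_t[a] and t[a] == "nan")):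
--                         return 0
--         return 1
--     else:
--         return 0
-- ===== SOURCE B (Python) =====
-- def JCC(new_t, existing_t):
--     # Single pass: check consistency and track shared-attribute existence in one scan.
--     found_shared = False
--     new_keys = set(new_t.keys())
--     for t in existing_t:
--         for a in new_keys & t.keys():
--             found_shared = True
--             if t[a] != new_t[a] or t[a] == "nan":
--                 return 0
--     return 1 if found_shared else 0
-- ===== Notes on version B (the rewrite author's own statement) =====
-- stated objective: simpler
-- what changed: Replaces A's two-phase structure (fold a global union schema over all tuples, intersect with the new tuple's schema, then rescan every tuple against that global intersection) by a single pass over existing_t that intersects key sets per tuple and tracks shared-attribute existence with a boolean flag.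
import Mathlib
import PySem

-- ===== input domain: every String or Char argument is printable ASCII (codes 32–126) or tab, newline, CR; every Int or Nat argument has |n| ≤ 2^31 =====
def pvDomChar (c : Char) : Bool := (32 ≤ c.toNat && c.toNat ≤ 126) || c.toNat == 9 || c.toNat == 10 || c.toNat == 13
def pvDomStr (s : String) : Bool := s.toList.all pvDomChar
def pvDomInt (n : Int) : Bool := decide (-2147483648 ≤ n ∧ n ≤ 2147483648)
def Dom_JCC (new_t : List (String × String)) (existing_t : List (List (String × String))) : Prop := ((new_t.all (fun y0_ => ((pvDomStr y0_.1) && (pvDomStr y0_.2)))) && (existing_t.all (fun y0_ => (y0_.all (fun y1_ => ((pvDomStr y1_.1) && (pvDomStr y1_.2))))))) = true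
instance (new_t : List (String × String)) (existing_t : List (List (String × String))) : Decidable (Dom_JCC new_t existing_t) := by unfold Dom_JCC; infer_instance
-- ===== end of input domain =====

-- B merges A's two phases (global schema union + rescan) into one per-tuple pass with a shared-flag.
-- ===== PORT A =====
-- t[a] for a key a known to be present: first-match lookup (Python dict access)
def pvVal (d : List (String × String)) (a : String) : String := (d.lookup a).getD ""

def JCC (new_t : List (String × String)) (existing_t : List (List (String × String))) : Int :=
  let existing_t_schema : PySem.Set String :=
    existing_t.foldl (fun s t => PySem.Set.union s (PySem.Set.ofList (t.map Prod.fst))) PySem.Set.empty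
  let new_t_schema : PySem.Set String := PySem.Set.ofList (new_t.map Prod.fst)
  let intersecting_attributes := PySem.Set.inter new_t_schema existing_t_schema
  if PySem.Set.len intersecting_attributes > 0 then
    -- early-return double loop: any tuple with an attribute triggering the condition returns 0
    if existing_t.any (fun t =>
        let current_t_schema : PySem.Set String := PySem.Set.ofList (t.map Prod.fst)
        intersecting_attributes.any (fun a =>
          PySem.Set.contains current_t_schema a &&
            ((pvVal t a != pvVal new_t a) ||
             (pvVal t a == pvVal new_t a && pvVal t a == "nan"))))
    then 0 else 1
  else 0

-- ===== PORT B =====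
-- t[a] / new_t[a] in Source B: first-match lookup (Python dict access)
def pvValB (d : List (String × String)) (a : String) : String := (d.lookup a).getD ""

-- loop of Source B: early return 0 on inconsistency, carry the found_shared flag
def JCC_altLoop (new_t : List (String × String)) (new_keys : PySem.Set String)
    (rest : List (List (String × String))) (found_shared : Bool) : Int :=
  match rest with
  | [] => if found_shared then 1 else 0
  | t :: rs =>
    let shared := PySem.Set.inter new_keys (t.map Prod.fst)
    if shared.any (fun a => (pvValB t a != pvValB new_t a) || (pvValB t a == "nan")) then 0
    else JCC_altLoop new_t new_keys rs (found_shared || !shared.isEmpty)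

def JCC_alt (new_t : List (String × String)) (existing_t : List (List (String × String))) : Int :=
  JCC_altLoop new_t (PySem.Set.ofList (new_t.map Prod.fst)) existing_t false

-- ===== PRECONDITION & SPEC =====
def Spec_JCC (new_t : List (String × String)) (existing_t : List (List (String × String))) (out : Int) : Prop := out = JCC_alt new_t existing_t
instance (new_t : List (String × String)) (existing_t : List (List (String × String))) (out : Int) : Decidable (Spec_JCC new_t existing_t out) := by unfold Spec_JCC; infer_instance

-- ===== CLAIM (what is proved, stated in full; the proofs are below) =====
def Claim_equal_JCC : Prop := ∀ (new_t : List (String × String)) (existing_t : List (List (String × String))), Dom_JCC new_t existing_t → Spec_JCC new_t existing_t (JCC new_t existing_t)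

-- ===== LEMMAS AND PROOFS =====

lemma mem_schema_fold (l : List (List (String × String))) (s : PySem.Set String) (a : String) :
    a ∈ l.foldl (fun s t => PySem.Set.union s (PySem.Set.ofList (t.map Prod.fst))) s ↔
      a ∈ s ∨ ∃ t ∈ l, a ∈ t.map Prod.fst := by
  induction l generalizing s with
  | nil => simp
  | cons t rs ih =>
    simp [ih, PySem.Set.mem_union, PySem.Set.mem_ofList]
    tauto

lemma bad_eq (x y : String) :
    ((x != y) || (x == y && x == "nan")) = ((x != y) || (x == "nan")) := by
  by_cases h : x = y
  · simp [h]
  · have hb : (x == y) = false := by simp [h]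
    simp [hb, bne]

lemma pvValB_eq : pvValB = pvVal := rfl

lemma altLoop_eq (new_t : List (String × String)) (keys : PySem.Set String)
    (rs : List (List (String × String))) (found : Bool) :
    JCC_altLoop new_t keys rs found =
      if rs.any (fun t => (PySem.Set.inter keys (t.map Prod.fst)).any
          (fun a => (pvValB t a != pvValB new_t a) || (pvValB t a == "nan"))) then 0
      else if (found || rs.any (fun t => !(PySem.Set.inter keys (t.map Prod.fst)).isEmpty))
        then 1 else 0 := by
  induction rs generalizing found with
  | nil => simp [JCC_altLoop]
  | cons t rs ih =>
    cases h : (PySem.Set.inter keys (t.map Prod.fst)).any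
        (fun a => (pvValB t a != pvValB new_t a) || (pvValB t a == "nan")) with
    | true => simp [JCC_altLoop, h]
    | false =>
      rw [JCC_altLoop]
      simp only [List.any_cons, h, Bool.false_or, ih]
      simp [Bool.or_assoc]

theorem JCC_eq (new_t : List (String × String)) (existing_t : List (List (String × String))) :
    JCC new_t existing_t = JCC_alt new_t existing_t := by
  unfold JCC JCC_alt
  rw [altLoop_eq]
  simp only [pvValB_eq, bad_eq, Bool.false_or]
  set Knew : PySem.Set String := PySem.Set.ofList (new_t.map Prod.fst) with hKnew
  set Sch : PySem.Set String :=
    existing_t.foldl (fun s t => PySem.Set.union s (PySem.Set.ofList (t.map Prod.fst)))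
      PySem.Set.empty with hSch
  have hmem : ∀ a : String, a ∈ PySem.Set.inter Knew Sch ↔
      a ∈ new_t.map Prod.fst ∧ ∃ t ∈ existing_t, a ∈ t.map Prod.fst := by
    intro a
    rw [PySem.Set.mem_inter, hSch, mem_schema_fold, hKnew, PySem.Set.mem_ofList]
    simp [PySem.Set.empty]
  -- per-tuple: A's scan of the global intersection equals B's scan of the local one
  have hg : ∀ t ∈ existing_t,
      ((PySem.Set.inter Knew Sch).any (fun a =>
          PySem.Set.contains (PySem.Set.ofList (t.map Prod.fst)) a &&
            ((pvVal t a != pvVal new_t a) || (pvVal t a == "nan"))) = true) ↔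
      ((PySem.Set.inter Knew (t.map Prod.fst)).any (fun a =>
          (pvVal t a != pvVal new_t a) || (pvVal t a == "nan")) = true) := by
    intro t ht
    simp only [List.any_eq_true, Bool.and_eq_true]
    constructor
    · rintro ⟨a, ha, hc, hb⟩
      rw [PySem.Set.contains_iff, PySem.Set.mem_ofList] at hc
      refine ⟨a, ?_, hb⟩
      rw [PySem.Set.mem_inter]
      refine ⟨?_, hc⟩
      rw [hKnew, PySem.Set.mem_ofList]
      exact ((hmem a).mp ha).1
    · rintro ⟨a, ha, hb⟩
      rw [PySem.Set.mem_inter, hKnew, PySem.Set.mem_ofList] at ha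
      refine ⟨a, (hmem a).mpr ⟨ha.1, t, ht, ha.2⟩, ?_, hb⟩
      rw [PySem.Set.contains_iff, PySem.Set.mem_ofList]
      exact ha.2
  by_cases hp : (existing_t.any (fun t =>
      (PySem.Set.inter Knew (t.map Prod.fst)).any (fun a =>
        (pvVal t a != pvVal new_t a) || (pvVal t a == "nan")))) = true
  · -- some tuple is inconsistent on a shared attribute: both return 0
    obtain ⟨t, ht, hbad⟩ := List.any_eq_true.mp hp
    obtain ⟨a, ha, hb⟩ := List.any_eq_true.mp hbad
    rw [PySem.Set.mem_inter, hKnew, PySem.Set.mem_ofList] at ha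
    have hlen : PySem.Set.len (PySem.Set.inter Knew Sch) > 0 := by
      have hma : a ∈ PySem.Set.inter Knew Sch := (hmem a).mpr ⟨ha.1, t, ht, ha.2⟩
      simp only [PySem.Set.len]
      have := List.length_pos_of_mem hma
      omega
    have hga : (existing_t.any (fun t =>
        (PySem.Set.inter Knew Sch).any (fun a =>
          PySem.Set.contains (PySem.Set.ofList (t.map Prod.fst)) a &&
            ((pvVal t a != pvVal new_t a) || (pvVal t a == "nan"))))) = true := by
      rw [List.any_eq_true]
      exact ⟨t, ht, (hg t ht).mpr hbad⟩
    rw [if_pos hlen, if_pos hga, if_pos hp]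
  · have hga : ¬ (existing_t.any (fun t =>
        (PySem.Set.inter Knew Sch).any (fun a =>
          PySem.Set.contains (PySem.Set.ofList (t.map Prod.fst)) a &&
            ((pvVal t a != pvVal new_t a) || (pvVal t a == "nan"))))) = true := by
      intro hc
      rw [List.any_eq_true] at hc
      obtain ⟨t, ht, hbad⟩ := hc
      exact hp (List.any_eq_true.mpr ⟨t, ht, (hg t ht).mp hbad⟩)
    by_cases hs : (existing_t.any (fun t =>
        !(PySem.Set.inter Knew (t.map Prod.fst)).isEmpty)) = true
    · -- a shared attribute exists and no inconsistency: both return 1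
      obtain ⟨t, ht, hne⟩ := List.any_eq_true.mp hs
      rw [Bool.not_eq_eq_eq_not, Bool.not_true, List.isEmpty_eq_false_iff_exists_mem] at hne
      obtain ⟨a, ha⟩ := hne
      rw [PySem.Set.mem_inter, hKnew, PySem.Set.mem_ofList] at ha
      have hlen : PySem.Set.len (PySem.Set.inter Knew Sch) > 0 := by
        have hma : a ∈ PySem.Set.inter Knew Sch := (hmem a).mpr ⟨ha.1, t, ht, ha.2⟩
        simp only [PySem.Set.len]
        have := List.length_pos_of_mem hma
        omega
      rw [if_pos hlen, if_neg hga, if_neg hp, if_pos hs]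
    · -- no shared attribute at all: both return 0
      have hlen : ¬ PySem.Set.len (PySem.Set.inter Knew Sch) > 0 := by
        intro hc
        simp only [PySem.Set.len] at hc
        have hne : PySem.Set.inter Knew Sch ≠ [] := by
          intro he; simp [he] at hc
        obtain ⟨a, ha⟩ : ∃ a, a ∈ PySem.Set.inter Knew Sch :=
          ⟨(PySem.Set.inter Knew Sch).head hne, List.head_mem hne⟩
        obtain ⟨h1, t, ht, h2⟩ := (hmem a).mp ha
        apply hs
        rw [List.any_eq_true]
        refine ⟨t, ht, ?_⟩
        rw [Bool.not_eq_eq_eq_not, Bool.not_true, List.isEmpty_eq_false_iff_exists_mem]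
        exact ⟨a, by rw [PySem.Set.mem_inter, hKnew, PySem.Set.mem_ofList]; exact ⟨h1, h2⟩⟩
      rw [if_neg hlen, if_neg hp, if_neg hs]

-- ===== VERDICT (by name: the statement is the Claim_ definition above) =====
theorem JCC_spec : Claim_equal_JCC := by
  intro new_t existing_t _
  unfold Spec_JCC
  exact JCC_eq new_t existing_t
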